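-- pv_equiv track=rewrite | github.com/choigwanho/TIL | 01.OJ/Programmers/Python3/프로그래머스 코딩테스트 실전 대비 모의고사 1차/3.py | solution
-- ===== SOURCE A (Python) =====
-- from collections import deque
--
-- def solution(order):
--     Q = deque() # 오름차순 리스트
--     for i in range(1,len(order)+1):
--         Q.append(i)
--
--     st = deque() # 컨테이너 벨트 리스트
--     cnt =0
--
--     while Q: # 순서대로 비교
--         if order[cnt] != Q[0]: # 오름차순과 순서가 다를때
--             if st and order[cnt] == st[-1]: # 컨테이너벨트에 값이 있고 탐과 순서가 같으면
--                 cnt +=1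
--                 st.pop() # 출력
--             else:
--                 st.append(Q.popleft()) # 컨테이너 벨트에 싣는다.
--         else: # 같으면 출력
--             cnt += 1
--             Q.popleft()
--
--     while st: # 큐가 비었으면 스택의 탑이 order 순서가 다른게 나올때까지 돌린다.
--         if order[cnt] == st[-1]:
--             cnt += 1
--             st.pop()
--         else:
--             break
--     return cnt
-- ===== SOURCE B (Python) =====
-- def solution(order):
--     n = len(order)
--     stack = []
--     cnt = 0
--     for i in range(1, n + 1):
--         stack.append(i)
--         while stack and cnt < n and stack[-1] == order[cnt]:
--             stack.pop()
--             cnt += 1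
--     return cnt
-- ===== Notes on version B (the rewrite author's own statement) =====
-- stated objective: simpler
-- what changed: Replaced A's two deques, three-branch single-operation outer loop and separate end-of-queue drain loop with a single for-loop that pushes each belt item 1..n onto one list and greedily drains it in an inner while, returning the count.
import Mathlib
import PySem

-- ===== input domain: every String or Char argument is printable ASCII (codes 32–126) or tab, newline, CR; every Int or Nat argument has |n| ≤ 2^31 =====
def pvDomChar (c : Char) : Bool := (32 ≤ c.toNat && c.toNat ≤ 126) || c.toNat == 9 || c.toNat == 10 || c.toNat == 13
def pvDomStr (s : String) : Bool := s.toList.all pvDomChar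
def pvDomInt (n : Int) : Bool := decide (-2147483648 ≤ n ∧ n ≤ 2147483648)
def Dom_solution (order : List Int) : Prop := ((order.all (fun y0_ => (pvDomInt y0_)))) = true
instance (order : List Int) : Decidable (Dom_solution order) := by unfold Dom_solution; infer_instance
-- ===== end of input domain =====

-- B replaces A's two-deque three-branch simulation by one push-then-drain loop over 1..n (simpler decomposition, same O(n) cost).
-- A never raises: in every reachable state where order[cnt] is read, 0 ≤ cnt < len(order)
-- (cnt counts matched items, and cnt = len forces both containers empty), so the pyGetD
-- default 0 below is never the value Python would not compute.

-- ===== PORT A =====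
-- end-of-queue drain: 'while st: if order[cnt] == st[-1]: cnt += 1; st.pop() else: break'
-- (st is kept top-first: append = cons, st[-1] = head, pop = tail)
def drainA (order : List Int) (st : List Int) (cnt : Int) : Int :=
  match st with
  | [] => cnt
  | t :: s => if PySem.List.pyGetD order cnt 0 = t then drainA order s (cnt + 1) else cnt

-- main 'while Q' loop (Q front-first: Q[0] = head, popleft = tail)
def loopA (order : List Int) : List Int → List Int → Int → Int
  | [], st, cnt => drainA order st cnt
  | q :: Qr, st, cnt =>
    if PySem.List.pyGetD order cnt 0 ≠ q then
      match st with
      | t :: s =>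
        if PySem.List.pyGetD order cnt 0 = t then loopA order (q :: Qr) s (cnt + 1)
        else loopA order Qr (q :: t :: s) cnt
      | [] => loopA order Qr [q] cnt
    else loopA order Qr st (cnt + 1)
  termination_by Q st _ => 2 * Q.length + st.length
  decreasing_by all_goals (simp [List.length]; try omega)

def solution (order : List Int) : Int :=
  loopA order (PySem.List.pyRange 1 ((order.length : Int) + 1) 1) [] 0

-- ===== PORT B =====
-- inner 'while stack and cnt < n and stack[-1] == order[cnt]' (stack top-first); returns (stack, cnt)
def drainB (n : Int) (order : List Int) (stack : List Int) (cnt : Int) : List Int × Int :=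
  match stack with
  | [] => ([], cnt)
  | t :: s =>
    if cnt < n ∧ PySem.List.pyGetD order cnt 0 = t then drainB n order s (cnt + 1)
    else (t :: s, cnt)

-- 'for i in range(1, n+1): stack.append(i); <drain>'
def loopB (n : Int) (order : List Int) : List Int → List Int → Int → Int
  | [], _, cnt => cnt
  | i :: rest, stack, cnt =>
    let p := drainB n order (i :: stack) cnt
    loopB n order rest p.1 p.2

def solution_alt (order : List Int) : Int :=
  loopB (order.length : Int) order (PySem.List.pyRange 1 ((order.length : Int) + 1) 1) [] 0

-- ===== PRECONDITION & SPEC =====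
def Spec_solution (order : List Int) (out : Int) : Prop := out = solution_alt order
instance (order : List Int) (out : Int) : Decidable (Spec_solution order out) := by unfold Spec_solution; infer_instance

-- ===== CLAIM (what is proved, stated in full; the proofs are below) =====
def Claim_equal_solution : Prop := ∀ (order : List Int), Dom_solution order → Spec_solution order (solution order)

-- ===== LEMMAS AND PROOFS =====

-- out-of-range read yields the default 0
lemma pyGetD_oob (order : List Int) (cnt : Int) (h : (order.length : Int) ≤ cnt) :
    PySem.List.pyGetD order cnt 0 = 0 := by
  have hn : PySem.List.pyGet? order cnt = none := by
    rw [PySem.List.pyGet?_eq_none_iff]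
    simp [PySem.Raise.InRange]; omega
  exact PySem.List.pyGetD_of_none _ _ _ hn

-- A's final drain equals the second component of B's drain (stack elements positive)
lemma drain_eq (order : List Int) (st : List Int) (cnt : Int)
    (hpos : ∀ x ∈ st, 0 < x) :
    drainA order st cnt = (drainB (order.length : Int) order st cnt).2 := by
  induction st generalizing cnt with
  | nil => simp [drainA, drainB]
  | cons t s ih =>
    by_cases hn : cnt < (order.length : Int)
    · by_cases hm : PySem.List.pyGetD order cnt 0 = t
      · simp [drainA, drainB, hm, hn]
        exact ih (cnt + 1) (fun x hx => hpos x (List.mem_cons_of_mem _ hx))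
      · simp [drainA, drainB, hm, hn]
    · have h0 : PySem.List.pyGetD order cnt 0 = 0 := pyGetD_oob order cnt (by omega)
      have ht : (0:Int) < t := hpos t (List.mem_cons_self)
      have hm : PySem.List.pyGetD order cnt 0 ≠ t := by omega
      simp [drainA, drainB, hm, hn]

-- if a drained-state top mismatches (or the stack is empty), drainB is the identity
lemma drainB_fix (n : Int) (order : List Int) (st : List Int) (cnt : Int)
    (h : ∀ t s, st = t :: s → ¬ (cnt < n ∧ PySem.List.pyGetD order cnt 0 = t)) :
    drainB n order st cnt = (st, cnt) := by
  cases st with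
  | nil => simp [drainB]
  | cons t s => simp [drainB, h t s rfl]

-- a nonzero read is in range
lemma read_in_range (order : List Int) (cnt : Int)
    (h : PySem.List.pyGetD order cnt 0 ≠ 0) : cnt < (order.length : Int) := by
  by_contra hn
  exact h (pyGetD_oob order cnt (by omega))

-- main simulation lemma: A's loop from any invariant-respecting state equals B's
-- loop started at the drained version of that state
lemma main_sim (order : List Int) : ∀ (N : Nat) (Q st : List Int) (cnt : Int),
    2 * Q.length + st.length ≤ N →
    0 ≤ cnt →
    (∀ q ∈ Q, 0 < q) →
    Q.Pairwise (· < ·) →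
    (∀ x ∈ st, 0 < x) →
    (∀ x ∈ st, ∀ q ∈ Q, x < q) →
    loopA order Q st cnt =
      loopB (order.length : Int) order Q
        (drainB (order.length : Int) order st cnt).1
        (drainB (order.length : Int) order st cnt).2 := by
  intro N
  induction N with
  | zero =>
    intro Q st cnt hN _ _ _ _ _
    have hQ : Q = [] := by cases Q <;> simp_all
    have hst : st = [] := by cases st <;> simp_all
    subst hQ; subst hst
    simp [loopA, loopB, drainA, drainB]
  | succ N ih =>
    intro Q st cnt hN hc hQpos hQsort hstpos hlt
    cases Q with
    | nil =>
      simp only [loopA, loopB]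
      exact drain_eq order st cnt hstpos
    | cons q Qr =>
      have hq : (0:Int) < q := hQpos q List.mem_cons_self
      by_cases hPq : PySem.List.pyGetD order cnt 0 = q
      · -- A3: queue-front match
        have hcn : cnt < (order.length : Int) := read_in_range order cnt (by omega)
        have hfix : drainB (order.length : Int) order st cnt = (st, cnt) := by
          apply drainB_fix
          intro t s hst
          have : t < q := hlt t (by simp [hst]) q List.mem_cons_self
          intro ⟨_, hPt⟩; omega
        have hstep : drainB (order.length : Int) order (q :: st) cnt
            = drainB (order.length : Int) order st (cnt + 1) := by
          simp [drainB, hcn, hPq]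
        rw [hfix]
        have hrhs : loopB (order.length : Int) order (q :: Qr) st cnt
            = loopB (order.length : Int) order Qr
                (drainB (order.length : Int) order st (cnt + 1)).1
                (drainB (order.length : Int) order st (cnt + 1)).2 := by
          simp only [loopB, hstep]
        rw [hrhs]
        have hlhs : loopA order (q :: Qr) st cnt = loopA order Qr st (cnt + 1) := by
          rw [loopA.eq_def]; simp [hPq]
        rw [hlhs]
        exact ih Qr st (cnt + 1) (by simp at hN ⊢; omega) (by omega)
          (fun x hx => hQpos x (List.mem_cons_of_mem _ hx))
          (List.Pairwise.of_cons hQsort) hstpos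
          (fun x hx q' hq' => hlt x hx q' (List.mem_cons_of_mem _ hq'))
      · cases st with
        | cons t s =>
          by_cases hPt : PySem.List.pyGetD order cnt 0 = t
          · -- A1: stack-top match
            have ht : (0:Int) < t := hstpos t List.mem_cons_self
            have hcn : cnt < (order.length : Int) := read_in_range order cnt (by omega)
            have hstep : drainB (order.length : Int) order (t :: s) cnt
                = drainB (order.length : Int) order s (cnt + 1) := by
              simp [drainB, hcn, hPt]
            have htq : t ≠ q := by
              intro h; exact hPq (hPt.trans h)
            have hlhs : loopA order (q :: Qr) (t :: s) cnt
                = loopA order (q :: Qr) s (cnt + 1) := by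
              rw [loopA.eq_def]; simp [hPt, htq]
            rw [hlhs, hstep]
            exact ih (q :: Qr) s (cnt + 1) (by simp at hN ⊢; omega) (by omega)
              hQpos hQsort (fun x hx => hstpos x (List.mem_cons_of_mem _ hx))
              (fun x hx => hlt x (List.mem_cons_of_mem _ hx))
          · -- A2 (stack-top mismatch): push
            have hfix : drainB (order.length : Int) order (t :: s) cnt
                = (t :: s, cnt) := by
              apply drainB_fix
              intro t' s' heq
              injection heq with h1 _
              subst h1
              intro ⟨_, hPt'⟩; exact hPt hPt'
            have hlhs : loopA order (q :: Qr) (t :: s) cnt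
                = loopA order Qr (q :: t :: s) cnt := by
              rw [loopA.eq_def]; simp [hPq, hPt]
            rw [hfix, hlhs]
            have hrhs : loopB (order.length : Int) order (q :: Qr) (t :: s) cnt
                = loopB (order.length : Int) order Qr
                    (drainB (order.length : Int) order (q :: t :: s) cnt).1
                    (drainB (order.length : Int) order (q :: t :: s) cnt).2 := by
              simp only [loopB]
            rw [hrhs]
            refine ih Qr (q :: t :: s) cnt (by simp at hN ⊢; omega) hc
              (fun x hx => hQpos x (List.mem_cons_of_mem _ hx))
              (List.Pairwise.of_cons hQsort) ?_ ?_
            · intro x hx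
              rcases List.mem_cons.mp hx with h | h
              · omega
              · exact hstpos x h
            · intro x hx q' hq'
              rcases List.mem_cons.mp hx with h | h
              · subst h
                exact (List.pairwise_cons.mp hQsort).1 q' hq'
              · exact hlt x h q' (List.mem_cons_of_mem _ hq')
        | nil =>
            -- A2 (empty stack): push
            have hfix : drainB (order.length : Int) order ([] : List Int) cnt
                = ([], cnt) := by simp [drainB]
            have hlhs : loopA order (q :: Qr) [] cnt = loopA order Qr [q] cnt := by
              rw [loopA.eq_def]; simp [hPq]
            rw [hfix, hlhs]
            have hrhs : loopB (order.length : Int) order (q :: Qr) [] cnt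
                = loopB (order.length : Int) order Qr
                    (drainB (order.length : Int) order [q] cnt).1
                    (drainB (order.length : Int) order [q] cnt).2 := by
              simp only [loopB]
            rw [hrhs]
            exact ih Qr [q] cnt (by simp at hN ⊢; omega) hc
              (fun x hx => hQpos x (List.mem_cons_of_mem _ hx))
              (List.Pairwise.of_cons hQsort)
              (by intro x hx; simp at hx; omega)
              (by intro x hx q' hq'; simp at hx; subst hx
                  exact (List.pairwise_cons.mp hQsort).1 q' hq')

-- ===== VERDICT (by name: the statement is the Claim_ definition above) =====
theorem solution_spec : Claim_equal_solution := by
  intro order _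
  unfold Spec_solution solution solution_alt
  have h := main_sim order
      (2 * (PySem.List.pyRange 1 ((order.length : Int) + 1) 1).length)
      (PySem.List.pyRange 1 ((order.length : Int) + 1) 1) [] 0
      (by simp) (by omega)
      (by intro q hq
          rw [PySem.List.mem_pyRange_one] at hq
          omega)
      (PySem.List.pairwise_lt_pyRange_one 1 ((order.length : Int) + 1))
      (by simp) (by simp)
  rw [h]
  simp [drainB]
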